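-- pv_equiv track=rewrite | github.com/mustafaerenkoc44/BLG-475E-Term-Project | Phase1/scripts/python/generate_selected_solutions.py | braces_closed
-- ===== SOURCE A (Python) =====
-- def braces_closed(source: str) -> bool:
--     balance = 0
--     for char in source:
--         if char == "{":
--             balance += 1
--         elif char == "}":
--             balance -= 1
--     return balance <= 0
-- ===== SOURCE B (Python) =====
-- def braces_closed(source: str) -> bool:
--     return source.count("{") <= source.count("}")
-- ===== Notes on version B (the rewrite author's own statement) =====
-- stated objective: simpler
-- what changed: Replaces the single-pass running-balance accumulator loop with two independent aggregate counts of opening and closing braces compared directly.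
import Mathlib
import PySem

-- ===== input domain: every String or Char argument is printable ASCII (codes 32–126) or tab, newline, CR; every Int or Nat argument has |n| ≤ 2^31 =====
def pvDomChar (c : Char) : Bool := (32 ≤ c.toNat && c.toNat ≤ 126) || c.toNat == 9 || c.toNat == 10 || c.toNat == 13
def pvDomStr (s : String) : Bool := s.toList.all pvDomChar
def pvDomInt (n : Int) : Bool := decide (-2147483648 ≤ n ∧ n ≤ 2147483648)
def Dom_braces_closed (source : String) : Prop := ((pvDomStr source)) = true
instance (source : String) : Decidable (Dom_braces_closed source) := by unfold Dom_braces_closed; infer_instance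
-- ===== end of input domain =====

-- B replaces A's running-balance loop with two independent aggregate counts compared directly (simpler decomposition).


-- ===== PORT A =====
-- literal port: one pass over the characters maintaining a running balance
def braces_closed (source : String) : Bool :=
  let balance : Int := source.toList.foldl
    (fun balance char =>
      if char = '{' then balance + 1
      else if char = '}' then balance - 1
      else balance) 0
  decide (balance ≤ 0)

-- ===== PORT B =====
-- literal port of Source B: compare the two substring counts
def braces_closed_alt (source : String) : Bool :=
  decide (PySem.Str.count source "{" ≤ PySem.Str.count source "}")

-- ===== PRECONDITION & SPEC =====
def Spec_braces_closed (source : String) (out : Bool) : Prop := out = braces_closed_alt source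
instance (source : String) (out : Bool) : Decidable (Spec_braces_closed source out) := by unfold Spec_braces_closed; infer_instance

-- ===== CLAIM (what is proved, stated in full; the proofs are below) =====
def Claim_equal_braces_closed : Prop := ∀ (source : String), Dom_braces_closed source → Spec_braces_closed source (braces_closed source)

-- ===== LEMMAS AND PROOFS =====

-- For a single-character needle, Python's substring count is the character count.
theorem count_go_singleton (c : Char) :
    ∀ (l : List Char) (fuel acc : Nat), l.length ≤ fuel →
      PySem.Chars.count.go [c] fuel l acc = acc + l.count c := by
  intro l
  induction l with
  | nil =>
      intro fuel acc _
      cases fuel <;> simp [PySem.Chars.count.go]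
  | cons h t ih =>
      intro fuel acc hf
      cases fuel with
      | zero => simp at hf
      | succ n =>
          simp only [List.length_cons, Nat.succ_le_succ_iff] at hf
          by_cases hc : h = c
          · subst hc
            simp [PySem.Chars.count.go, List.isPrefixOf, ih n (acc + 1) hf]
            omega
          · simp [PySem.Chars.count.go, List.isPrefixOf, hc, ih n acc hf, Ne.symm hc]

theorem count_singleton (s : String) (c : Char) :
    PySem.Str.count s (String.ofList [c]) = s.toList.count c := by
  rw [PySem.Str.count_eq]
  simp only [String.toList_ofList]
  rw [PySem.Chars.count]
  simp only [List.isEmpty_cons]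
  rw [count_go_singleton c s.toList s.toList.length 0 le_rfl]
  simp

-- The running balance of A's loop is count '{' minus count '}'.
theorem balance_eq (l : List Char) :
    ∀ (b : Int),
      l.foldl (fun balance char =>
        if char = '{' then balance + 1
        else if char = '}' then balance - 1
        else balance) b = b + (l.count '{' : Int) - (l.count '}' : Int) := by
  induction l with
  | nil => intro b; simp
  | cons h t ih =>
      intro b
      by_cases h1 : h = '{'
      · simp [h1, List.foldl_cons, ih]; ring
      · by_cases h2 : h = '}'
        · simp [h2, List.foldl_cons, ih]; ring
        · simp [h1, h2, List.foldl_cons, ih]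

-- ===== VERDICT (by name: the statement is the Claim_ definition above) =====
theorem braces_closed_spec : Claim_equal_braces_closed := by
  intro source _
  unfold Spec_braces_closed braces_closed braces_closed_alt
  have h1 : PySem.Str.count source "{" = source.toList.count '{' := count_singleton source '{'
  have h2 : PySem.Str.count source "}" = source.toList.count '}' := count_singleton source '}'
  rw [h1, h2, balance_eq]
  simp only [decide_eq_decide]
  omega
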